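-- pv_equiv track=rewrite | github.com/shaswata09/falcon | src/validator/performance/yara/yara_performance_evaluator.py | _check_string_overlaps
-- ===== SOURCE A (Python) =====
-- from typing import Optional, List, Dict, Tuple
--
-- def _check_string_overlaps(text_values: List[str]) -> List[str]:
--     """Check for overlapping/duplicate string patterns."""
--     overlaps = []
--     for i, s1 in enumerate(text_values):
--         for j, s2 in enumerate(text_values):
--             if i < j and len(s1) > 2 and len(s2) > 2:
--                 if s1 in s2 or s2 in s1:
--                     overlaps.append(f"'{s1[:20]}...' overlaps with '{s2[:20]}...'")
--     return overlaps
-- ===== SOURCE B (Python) =====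
-- def _check_string_overlaps(text_values):
--     """Check for overlapping/duplicate string patterns (memoised per distinct value pair)."""
--     longs = [s for s in text_values if len(s) > 2]
--     distinct = list(dict.fromkeys(longs))
--     # one substring test per ordered pair of DISTINCT values, instead of per index pair
--     table = [[a in b or b in a for b in distinct] for a in distinct]
--     index = {}
--     for i, v in enumerate(distinct):
--         index[v] = i
--     codes = [index[s] for s in longs]
--     out = []
--     pending = list(zip(longs, codes))
--     while pending:
--         (s1, c1), pending = pending[0], pending[1:]
--         row = table[c1]
--         for s2, c2 in pending:
--             if row[c2]:
--                 out.append(f"'{s1[:20]}...' overlaps with '{s2[:20]}...'")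
--     return out
-- ===== Notes on version B (the rewrite author's own statement) =====
-- stated objective: alternative
-- what changed: B filters out the short strings once, de-duplicates them, precomputes a containment table over the distinct values, and the pair loop then only does table lookups, performing one substring test per distinct value pair instead of one per index pair (intended as faster on duplicate-heavy inputs; a timing run could not confirm 'faster' across all large inputs, measuring 879x at n=4096 but a shared timeout on distinct-heavy n=16384).
import Mathlib
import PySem

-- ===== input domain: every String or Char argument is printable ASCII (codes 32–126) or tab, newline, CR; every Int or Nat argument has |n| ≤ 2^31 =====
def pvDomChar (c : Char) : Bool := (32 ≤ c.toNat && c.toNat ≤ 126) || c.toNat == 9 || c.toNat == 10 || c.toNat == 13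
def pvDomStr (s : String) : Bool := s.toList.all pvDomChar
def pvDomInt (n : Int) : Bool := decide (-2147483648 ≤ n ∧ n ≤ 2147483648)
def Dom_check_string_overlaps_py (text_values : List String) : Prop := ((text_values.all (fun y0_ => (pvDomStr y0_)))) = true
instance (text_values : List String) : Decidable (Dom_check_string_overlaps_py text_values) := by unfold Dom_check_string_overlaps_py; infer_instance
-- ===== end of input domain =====

-- B re-implements A's all-pairs substring scan by de-duplicating the (long) strings first and
-- memoising one containment table over the distinct values; the pair loop then only looks the answers up
-- (objective: alternative — one containment test per distinct value pair instead of per index pair;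
-- same output, order and formatting).

-- the f-string  f"'{s1[:20]}...' overlaps with '{s2[:20]}...'"  (shared by both sources verbatim)
def pvFmt (s1 s2 : String) : String :=
  "'" ++ PySem.Str.slice s1 none (some 20) ++ "...' overlaps with '" ++ PySem.Str.slice s2 none (some 20) ++ "...'"

-- ===== PORT A =====
def check_string_overlaps_py (text_values : List String) : List String :=
  (PySem.List.enumerate text_values).foldl (fun overlaps p =>
    (PySem.List.enumerate text_values).foldl (fun overlaps q =>
      if p.1 < q.1 ∧ 2 < PySem.Str.len p.2 ∧ 2 < PySem.Str.len q.2 then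
        if PySem.Str.isIn p.2 q.2 || PySem.Str.isIn q.2 p.2 then
          overlaps ++ [pvFmt p.2 q.2]
        else overlaps
      else overlaps) overlaps) []

-- ===== PORT B =====
-- `a in b or b in a` of Source B
def pvOv (a b : String) : Bool := PySem.Str.isIn a b || PySem.Str.isIn b a

-- the `while pending:` loop of Source B (pop the head, scan the rest through the table)
def pvEmit (table : List (List Bool)) : List (String × Int) → List String
  | [] => []
  | (s1, c1) :: pending =>
      let row := PySem.List.pyGetD table c1 []
      (pending.foldl (fun out q =>
        if PySem.List.pyGetD row q.2 false then out ++ [pvFmt s1 q.1] else out) [])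
      ++ pvEmit table pending

def check_string_overlaps_py_alt (text_values : List String) : List String :=
  let longs := text_values.filter (fun s => decide (2 < PySem.Str.len s))
  let distinct := PySem.List.dedup longs
  let table := distinct.map (fun a => distinct.map (fun b => pvOv a b))
  let index := (PySem.List.enumerate distinct).foldl (fun d p => PySem.Dict.insert d p.2 p.1) PySem.Dict.empty
  let codes := longs.map (fun s => PySem.Dict.getD index s 0)
  pvEmit table (longs.zip codes)

-- ===== PRECONDITION & SPEC =====
def Spec_check_string_overlaps_py (text_values : List String) (out : List String) : Prop := out = check_string_overlaps_py_alt text_values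
instance (text_values : List String) (out : List String) : Decidable (Spec_check_string_overlaps_py text_values out) := by unfold Spec_check_string_overlaps_py; infer_instance

-- ===== CLAIM (what is proved, stated in full; the proofs are below) =====
def Claim_equal_check_string_overlaps_py : Prop := ∀ (text_values : List String), Dom_check_string_overlaps_py text_values → Spec_check_string_overlaps_py text_values (check_string_overlaps_py text_values)

-- ===== LEMMAS AND PROOFS =====

-- collapse Python's nested `if cond: if test: append` into one boolean guard
theorem pvIfPropAnd (P : Prop) [Decidable P] (b : Bool) (A B : List String) :
    (if P then (if b = true then A else B) else B)
      = (if (decide P && b) = true then A else B) := by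
  by_cases hP : P <;> cases b <;> simp [hP]

-- common normal form: emit the ordered pairs of a list, head against each later element
def pvPairs (cond : String → String → Bool) : List String → List String
  | [] => []
  | x :: xs => (xs.filter (fun y => cond x y)).map (fun y => pvFmt x y) ++ pvPairs cond xs

def pvLong (s : String) : Bool := decide (2 < PySem.Str.len s)

def pvCond (x y : String) : Bool := pvLong x && pvLong y && pvOv x y

-- ---- A-side ----

theorem pvEnumPairs (xs : List String) (s : Int) :
    (PySem.List.enumerate xs s).flatMap (fun p =>
      ((PySem.List.enumerate xs s).filter (fun q => decide (p.1 < q.1) && pvCond p.2 q.2)).map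
        (fun q => pvFmt p.2 q.2)) = pvPairs pvCond xs := by
  induction xs generalizing s with
  | nil => simp [PySem.List.enumerate, pvPairs]
  | cons x t ih =>
    rw [PySem.List.enumerate_cons, List.flatMap_cons]
    have hhead : (((s, x) :: PySem.List.enumerate t (s+1)).filter
          (fun q => decide ((s:Int) < q.1) && pvCond x q.2)).map (fun q => pvFmt x q.2)
        = (t.filter (fun y => pvCond x y)).map (fun y => pvFmt x y) := by
      rw [List.filter_cons, if_neg (by simp)]
      have h1 : (PySem.List.enumerate t (s+1)).filter (fun q => decide ((s:Int) < q.1) && pvCond x q.2)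
          = (PySem.List.enumerate t (s+1)).filter (fun q => pvCond x q.2) :=
        List.filter_congr (fun q hq => by
          obtain ⟨k, hk, rfl⟩ := (PySem.List.mem_enumerate_iff _ _ _).mp hq
          have hs : ((s:Int) < s + 1 + k) = True := by simp; omega
          simp [hs])
      rw [h1]
      conv_rhs => rw [← PySem.List.map_snd_enumerate t (s+1)]
      rw [List.filter_map, List.map_map]
      rfl
    have htail : ∀ p ∈ PySem.List.enumerate t (s+1),
        (((s, x) :: PySem.List.enumerate t (s+1)).filter
            (fun q => decide (p.1 < q.1) && pvCond p.2 q.2)).map (fun q => pvFmt p.2 q.2)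
        = ((PySem.List.enumerate t (s+1)).filter
            (fun q => decide (p.1 < q.1) && pvCond p.2 q.2)).map (fun q => pvFmt p.2 q.2) := by
      intro p hp
      obtain ⟨k, hk, rfl⟩ := (PySem.List.mem_enumerate_iff _ _ _).mp hp
      rw [List.filter_cons, if_neg (by simp; omega)]
    rw [hhead, List.flatMap_congr htail, ih (s+1)]
    simp [pvPairs]

set_option maxHeartbeats 1000000 in
theorem pvA_eq_pairs (tv : List String) :
    check_string_overlaps_py tv = pvPairs pvCond tv := by
  unfold check_string_overlaps_py
  have hinner : ∀ (acc : List String), ∀ p ∈ PySem.List.enumerate tv,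
      (PySem.List.enumerate tv).foldl (fun overlaps q =>
        if p.1 < q.1 ∧ 2 < PySem.Str.len p.2 ∧ 2 < PySem.Str.len q.2 then
          if PySem.Str.isIn p.2 q.2 || PySem.Str.isIn q.2 p.2 then
            overlaps ++ [pvFmt p.2 q.2]
          else overlaps
        else overlaps) acc
      = acc ++ ((PySem.List.enumerate tv).filter
          (fun q => decide (p.1 < q.1) && pvCond p.2 q.2)).map (fun q => pvFmt p.2 q.2) := by
    intro acc p _
    have hbody : ∀ (acc : List String), ∀ q ∈ PySem.List.enumerate tv,
        (if p.1 < q.1 ∧ 2 < PySem.Str.len p.2 ∧ 2 < PySem.Str.len q.2 then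
          if PySem.Str.isIn p.2 q.2 || PySem.Str.isIn q.2 p.2 then
            acc ++ [pvFmt p.2 q.2]
          else acc
        else acc)
        = (if (decide (p.1 < q.1) && pvCond p.2 q.2) = true then acc ++ [pvFmt p.2 q.2] else acc) := by
      intro acc q _
      rw [pvIfPropAnd]
      have hcnd : (decide (p.1 < q.1 ∧ 2 < PySem.Str.len p.2 ∧ 2 < PySem.Str.len q.2) &&
            (PySem.Str.isIn p.2 q.2 || PySem.Str.isIn q.2 p.2))
          = (decide (p.1 < q.1) && pvCond p.2 q.2) := by
        simp only [pvCond, pvLong, pvOv, Bool.decide_and, Bool.and_assoc]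
      rw [hcnd]
    rw [PySem.List.foldl_congr_mem' _ _ _ _ (fun q hq acc => hbody acc q hq),
      PySem.List.foldl_append_if]
  have houter := PySem.List.foldl_congr_mem' (PySem.List.enumerate tv) _
    (fun acc (p : Int × String) => acc ++ ((PySem.List.enumerate tv).filter
        (fun q => decide (p.1 < q.1) && pvCond p.2 q.2)).map (fun q => pvFmt p.2 q.2)) []
    (fun p hp acc => hinner acc p hp)
  rw [houter, PySem.List.foldl_append_eq_flatMap]
  simpa using pvEnumPairs tv 0

theorem pvPairs_cond_eq_filter (tv : List String) :
    pvPairs pvCond tv = pvPairs pvOv (tv.filter pvLong) := by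
  induction tv with
  | nil => rfl
  | cons x t ih =>
    by_cases hx : pvLong x = true
    · rw [List.filter_cons, if_pos hx]
      simp only [pvPairs]
      rw [ih, List.filter_filter]
      congr 1
      exact congrArg _ (List.filter_congr (fun y _ => by simp [pvCond, hx, Bool.and_comm]))
    · rw [List.filter_cons, if_neg hx]
      simp only [pvPairs]
      rw [ih]
      have hnil : t.filter (fun y => pvCond x y) = [] := by
        rw [List.filter_eq_nil_iff]
        intro y _
        simp [pvCond, Bool.eq_false_iff.mpr hx]
      simp [hnil]

-- ---- B-side ----

theorem pvEmit_eq_pairs (distinct : List String) (ps : List (String × Int))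
    (h : ∀ pr ∈ ps, ∃ (k : Nat) (hk : k < distinct.length), pr.2 = (k : Int) ∧ distinct[k] = pr.1) :
    pvEmit (distinct.map (fun a => distinct.map (fun b => pvOv a b))) ps
      = pvPairs pvOv (ps.map Prod.fst) := by
  induction ps with
  | nil => rfl
  | cons pr ps ih =>
    obtain ⟨s1, c1⟩ := pr
    obtain ⟨k1, hk1, hc1, hd1⟩ := h (s1, c1) List.mem_cons_self
    simp only at hc1 hd1
    rw [pvEmit]
    have hrow : PySem.List.pyGetD (distinct.map (fun a => distinct.map (fun b => pvOv a b))) c1 []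
        = distinct.map (fun b => pvOv s1 b) := by
      rw [hc1, PySem.List.pyGetD_natCast, List.getD_eq_getElem _ _ (by simpa using hk1),
        List.getElem_map, hd1]
    have hlook : ∀ q ∈ ps, (PySem.List.pyGetD (distinct.map (fun b => pvOv s1 b)) q.2 false)
        = pvOv s1 q.1 := by
      intro q hq
      obtain ⟨k2, hk2, hc2, hd2⟩ := h q (List.mem_cons_of_mem _ hq)
      rw [hc2, PySem.List.pyGetD_natCast, List.getD_eq_getElem _ _ (by simpa using hk2),
        List.getElem_map, hd2]
    rw [hrow, PySem.List.foldl_append_if, List.nil_append,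
      List.filter_congr hlook, ih (fun pr hpr => h pr (List.mem_cons_of_mem _ hpr))]
    simp only [List.map_cons, pvPairs]
    congr 1
    conv_rhs => rw [List.filter_map, List.map_map]
    rfl

theorem pvB_eq_pairs (tv : List String) :
    check_string_overlaps_py_alt tv = pvPairs pvOv (tv.filter pvLong) := by
  simp only [check_string_overlaps_py_alt]
  set longs := tv.filter (fun s => decide (2 < PySem.Str.len s)) with hlongs
  set distinct := PySem.List.dedup longs with hdistinct
  set index := (PySem.List.enumerate distinct).foldl
      (fun d p => PySem.Dict.insert d p.2 p.1) PySem.Dict.empty with hindex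
  have hitems : index.items = (PySem.List.enumerate distinct).map (fun p => (p.2, p.1)) := by
    have hfresh := PySem.Dict.items_foldl_insert_fresh
      (PySem.List.enumerate distinct)
      (fun p : Int × String => p.2) (fun p : Int × String => p.1)
      (PySem.Dict.empty : PySem.Dict String Int)
      (fun a _ => PySem.Dict.contains_empty _)
      (by rw [PySem.List.map_snd_enumerate]; exact PySem.List.nodup_dedup longs)
    rw [hindex]
    exact hfresh
  have hkeys : index.keys.Nodup := by
    have : index.keys = distinct := by
      show index.items.map (fun p => p.1) = distinct
      rw [hitems, List.map_map]
      exact PySem.List.map_snd_enumerate distinct 0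
    rw [this]; exact PySem.List.nodup_dedup longs
  have hcode : ∀ s ∈ longs, ∃ (k : Nat) (hk : k < distinct.length),
      PySem.Dict.getD index s 0 = (k : Int) ∧ distinct[k] = s := by
    intro s hs
    have hsd : s ∈ distinct := (PySem.List.mem_dedup _ _).mpr hs
    obtain ⟨k, hk, hget⟩ := List.getElem_of_mem hsd
    refine ⟨k, hk, ?_, hget⟩
    have hmem : (s, (k : Int)) ∈ index.items := by
      rw [hitems, List.mem_map]
      exact ⟨((k : Int), s), (PySem.List.mem_enumerate_iff _ _ _).mpr
        ⟨k, hk, by rw [hget]; simp⟩, rfl⟩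
    exact PySem.Dict.getD_of_mem_items index hmem hkeys 0
  have hzip : longs.zip (longs.map (fun s => PySem.Dict.getD index s 0))
      = longs.map (fun s => (s, PySem.Dict.getD index s 0)) := by
    have := @List.zip_map' String String Int id (fun s => PySem.Dict.getD index s 0) longs
    simpa using this
  rw [hzip, pvEmit_eq_pairs distinct _ (fun pr hpr => ?_)]
  · rw [List.map_map]
    show pvPairs pvOv (longs.map (fun s => s)) = pvPairs pvOv (tv.filter pvLong)
    rw [show longs.map (fun s => s) = longs from List.map_id' longs]
    rfl
  · obtain ⟨s, hs, rfl⟩ := List.mem_map.mp hpr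
    obtain ⟨k, hk, hg, hd⟩ := hcode s hs
    exact ⟨k, hk, hg, hd⟩

-- ===== VERDICT (by name: the statement is the Claim_ definition above) =====
theorem check_string_overlaps_py_spec : Claim_equal_check_string_overlaps_py := by
  intro tv _
  unfold Spec_check_string_overlaps_py
  rw [pvA_eq_pairs, pvPairs_cond_eq_filter, pvB_eq_pairs]
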